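-- pv_equiv track=rewrite | github.com/micostabal/ExpressionParser | src/OperationSplitter.py | charWithDepthsIndexes
-- ===== SOURCE A (Python) =====
-- from typing import List
--
-- def charWithDepthsIndexes(sentence: str, targetChar: str, depth: int) -> List[int]:
--   indexes=[]
--   currentDepth=0
--   for index, char in enumerate(sentence):
--     if char=='(':
--       currentDepth+=1
--     elif char==")":
--       currentDepth-=1
--     elif char==targetChar and depth==currentDepth:
--       indexes.append(index)
--   return indexes
-- ===== SOURCE B (Python) =====
-- def charWithDepthsIndexes(sentence: str, targetChar: str, depth: int):
--   # Pass 1: prefix-depth table; depths[i] = paren depth just before position i.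
--   depths = []
--   d = 0
--   for ch in sentence:
--     depths.append(d)
--     if ch == '(':
--       d += 1
--     elif ch == ')':
--       d -= 1
--   # Pass 2: filter positions against the table (parens themselves are never collected).
--   return [i for i, ch in enumerate(sentence)
--           if ch != '(' and ch != ')' and ch == targetChar and depths[i] == depth]
-- ===== Notes on version B (the rewrite author's own statement) =====
-- stated objective: alternative
-- what changed: Replaces the single fused loop carrying (indexes, currentDepth) by two passes: one cumulative pass building a prefix-depth table, then a comprehension filtering enumerate(sentence) against that table.
import Mathlib
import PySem

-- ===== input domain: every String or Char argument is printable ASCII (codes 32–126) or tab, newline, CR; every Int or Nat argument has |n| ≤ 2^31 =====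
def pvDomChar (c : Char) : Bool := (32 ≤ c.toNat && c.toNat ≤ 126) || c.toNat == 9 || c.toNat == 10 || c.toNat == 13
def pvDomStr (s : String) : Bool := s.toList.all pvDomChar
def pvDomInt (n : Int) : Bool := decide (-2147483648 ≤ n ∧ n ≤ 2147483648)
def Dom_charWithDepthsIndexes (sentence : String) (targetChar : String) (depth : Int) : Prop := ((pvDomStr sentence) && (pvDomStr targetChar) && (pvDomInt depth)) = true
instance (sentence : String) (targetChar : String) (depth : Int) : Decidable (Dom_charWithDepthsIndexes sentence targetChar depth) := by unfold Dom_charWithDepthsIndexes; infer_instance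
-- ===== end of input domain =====

-- B replaces A's single fused loop by two passes: a prefix-depth table, then a filter over enumerate against it (alternative decomposition, same cost).


-- ===== PORT A =====
-- literal port of A: one fold over enumerate(sentence) carrying (indexes, currentDepth)
def charWithDepthsIndexes (sentence : String) (targetChar : String) (depth : Int) : List Int :=
  ((PySem.List.enumerate sentence.toList 0).foldl
    (fun (st : List Int × Int) ic =>
      if ic.2 = '(' then (st.1, st.2 + 1)
      else if ic.2 = ')' then (st.1, st.2 - 1)
      else if String.mk [ic.2] = targetChar ∧ depth = st.2 then (st.1 ++ [ic.1], st.2)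
      else st)
    ([], 0)).1

-- ===== PORT B =====
-- pass 1 of Source B: build the prefix-depth table (depths, d) by one fold
def pvDepthsB (cs : List Char) : List Int :=
  (cs.foldl
    (fun (st : List Int × Int) ch =>
      let st' := (st.1 ++ [st.2], st.2)
      if ch = '(' then (st'.1, st'.2 + 1)
      else if ch = ')' then (st'.1, st'.2 - 1)
      else st')
    ([], 0)).1

-- pass 2 of Source B: the comprehension; depths[i] is always in range (i < len(sentence)), pyGetD is exact here
def charWithDepthsIndexes_alt (sentence : String) (targetChar : String) (depth : Int) : List Int :=
  let depths := pvDepthsB sentence.toList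
  ((PySem.List.enumerate sentence.toList 0).filter
    (fun ic => ic.2 != '(' && ic.2 != ')' && (String.mk [ic.2] == targetChar)
               && (PySem.List.pyGetD depths ic.1 0 == depth))).map (·.1)

-- ===== PRECONDITION & SPEC =====
def Spec_charWithDepthsIndexes (sentence : String) (targetChar : String) (depth : Int) (out : List Int) : Prop := out = charWithDepthsIndexes_alt sentence targetChar depth
instance (sentence : String) (targetChar : String) (depth : Int) (out : List Int) : Decidable (Spec_charWithDepthsIndexes sentence targetChar depth out) := by unfold Spec_charWithDepthsIndexes; infer_instance

-- ===== CLAIM (what is proved, stated in full; the proofs are below) =====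
def Claim_equal_charWithDepthsIndexes : Prop := ∀ (sentence : String) (targetChar : String) (depth : Int), Dom_charWithDepthsIndexes sentence targetChar depth → Spec_charWithDepthsIndexes sentence targetChar depth (charWithDepthsIndexes sentence targetChar depth)

-- ===== LEMMAS AND PROOFS =====

-- reference recursion: indexes of chars equal to t (not parens) seen at depth `depth`,
-- scanning cs with current absolute index i and current depth d
def pvSpecRec (t : String) (depth : Int) : List Char → Nat → Int → List Int
  | [], _, _ => []
  | c :: cs, i, d =>
    if c = '(' then pvSpecRec t depth cs (i+1) (d+1)
    else if c = ')' then pvSpecRec t depth cs (i+1) (d-1)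
    else if String.mk [c] = t ∧ depth = d then (i : Int) :: pvSpecRec t depth cs (i+1) d
    else pvSpecRec t depth cs (i+1) d

-- the pure per-char depth step
def pvStep (d : Int) (c : Char) : Int :=
  if c = '(' then d + 1 else if c = ')' then d - 1 else d

-- prefix-depth list as a recursion
def pvDepthsRec : List Char → Int → List Int
  | [], _ => []
  | c :: cs, d => d :: pvDepthsRec cs (pvStep d c)

theorem pvDepthsB_fold (cs : List Char) (acc : List Int) (d : Int) :
    cs.foldl
      (fun (st : List Int × Int) ch =>
        let st' := (st.1 ++ [st.2], st.2)
        if ch = '(' then (st'.1, st'.2 + 1)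
        else if ch = ')' then (st'.1, st'.2 - 1)
        else st')
      (acc, d)
    = (acc ++ pvDepthsRec cs d, (cs.foldl pvStep d)) := by
  induction cs generalizing acc d with
  | nil => simp [pvDepthsRec]
  | cons c cs ih =>
    simp only [List.foldl_cons, pvDepthsRec, pvStep]
    split_ifs with h1 h2 <;> simp_all

theorem pvDepthsB_eq (cs : List Char) : pvDepthsB cs = pvDepthsRec cs 0 := by
  simp [pvDepthsB, pvDepthsB_fold]

-- A's fold computes pvSpecRec (appended to the accumulator)
theorem portA_fold (t : String) (depth : Int) (cs : List Char) (i : Nat) (acc : List Int) (d : Int) :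
    ((PySem.List.enumerate cs (i : Int)).foldl
      (fun (st : List Int × Int) ic =>
        if ic.2 = '(' then (st.1, st.2 + 1)
        else if ic.2 = ')' then (st.1, st.2 - 1)
        else if String.mk [ic.2] = t ∧ depth = st.2 then (st.1 ++ [ic.1], st.2)
        else st)
      (acc, d)).1
    = acc ++ pvSpecRec t depth cs i d := by
  induction cs generalizing i acc d with
  | nil => simp [PySem.List.enumerate_nil, pvSpecRec]
  | cons c cs ih =>
    rw [PySem.List.enumerate_cons]
    simp only [List.foldl_cons, pvSpecRec]
    by_cases h1 : c = '('
    · simpa [h1] using ih (i+1) acc (d+1)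
    · by_cases h2 : c = ')'
      · simpa [h1, h2] using ih (i+1) acc (d-1)
      · by_cases h3 : String.mk [c] = t ∧ depth = d
        · simpa [h1, h2, h3] using ih (i+1) (acc ++ [(i : Int)]) d
        · simpa [h1, h2, h3] using ih (i+1) acc d

-- B's filter against a table ds ++ pvDepthsRec cs d (with ds.length = i) computes pvSpecRec
theorem portB_filter (t : String) (depth : Int) (cs : List Char) (i : Nat) (ds : List Int) (d : Int)
    (hlen : ds.length = i) :
    ((PySem.List.enumerate cs (i : Int)).filter
      (fun ic => ic.2 != '(' && ic.2 != ')' && (String.mk [ic.2] == t)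
                 && (PySem.List.pyGetD (ds ++ pvDepthsRec cs d) ic.1 0 == depth))).map (·.1)
    = pvSpecRec t depth cs i d := by
  induction cs generalizing i ds d with
  | nil => simp [PySem.List.enumerate_nil, pvSpecRec]
  | cons c cs ih =>
    subst hlen
    rw [PySem.List.enumerate_cons]
    have hi : ((ds.length : Int) + 1) = (((ds.length + 1 : Nat)) : Int) := by push_cast; ring
    have ihx := ih (ds.length + 1) (ds ++ [d]) (pvStep d c) (by simp)
    rw [List.append_assoc] at ihx
    simp only [List.singleton_append] at ihx
    rw [← hi] at ihx
    simp only [pvDepthsRec, List.filter_cons]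
    have hget : (ds ++ d :: pvDepthsRec cs (pvStep d c))[ds.length]?.getD 0 = d := by
      simp
    by_cases h1 : c = '('
    · simpa [h1, pvSpecRec, pvStep] using ihx
    · by_cases h2 : c = ')'
      · simpa [h1, h2, pvSpecRec, pvStep] using ihx
      · by_cases h3 : String.mk [c] = t
        · by_cases h4 : depth = d
          · simpa [h1, h2, h3, h4, pvSpecRec, pvStep, hget] using ihx
          · have h4' : ¬ d = depth := fun hh => h4 hh.symm
            simpa [h1, h2, h3, h4, h4', pvSpecRec, pvStep, hget] using ihx
        · simpa [h1, h2, h3, pvSpecRec, pvStep, hget] using ihx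

-- ===== VERDICT (by name: the statement is the Claim_ definition above) =====
theorem charWithDepthsIndexes_spec : Claim_equal_charWithDepthsIndexes := by
  intro sentence targetChar depth _
  unfold Spec_charWithDepthsIndexes charWithDepthsIndexes charWithDepthsIndexes_alt
  rw [pvDepthsB_eq]
  have hA := portA_fold targetChar depth sentence.toList 0 [] 0
  have hB := portB_filter targetChar depth sentence.toList 0 [] 0 rfl
  simp only [Nat.cast_zero, List.nil_append] at hA hB
  rw [hA, hB]
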